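-- pv_equiv track=rewrite | github.com/joshanashakya/dissertation | workspace/dataset/java-python/GeeksForGeeks/1850/A/2.py | checkEvenParity
-- ===== SOURCE A (Python) =====
-- def checkEvenParity(x):
--
--     # We basically count set bits
--     # https://www.geeksforgeeks.org/count-set-bits-in-an-integer/
--     parity = 0
--     while (x != 0):
--         x = x & (x - 1)
--         parity += 1
--
--     if (parity % 2 == 0):
--         return True
--     else:
--         return False
-- ===== SOURCE B (Python) =====
-- def checkEvenParity(x):
--     parity = 0
--     while x:
--         parity ^= (x & 1)
--         x >>= 1
--     return parity == 0
-- ===== Notes on version B (the rewrite author's own statement) =====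
-- stated objective: idiomatic
-- what changed: Replaces Kernighan's clear-lowest-set-bit jumping with a plain per-bit scan that XOR-folds the low bit while shifting right, comparing the accumulated parity bit to zero instead of taking a count modulo 2.
import Mathlib
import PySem

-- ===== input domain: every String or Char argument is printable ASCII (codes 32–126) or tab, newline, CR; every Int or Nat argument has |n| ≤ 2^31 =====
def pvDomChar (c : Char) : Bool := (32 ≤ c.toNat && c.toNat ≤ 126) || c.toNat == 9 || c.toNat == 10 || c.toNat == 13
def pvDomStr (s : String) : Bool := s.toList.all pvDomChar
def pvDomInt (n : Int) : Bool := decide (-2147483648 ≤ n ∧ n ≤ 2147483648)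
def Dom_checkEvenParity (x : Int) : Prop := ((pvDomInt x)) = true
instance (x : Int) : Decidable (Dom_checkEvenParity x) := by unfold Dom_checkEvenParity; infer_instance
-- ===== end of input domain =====

-- B replaces Kernighan's clear-lowest-set-bit jumping by a plain per-bit scan that
-- XOR-folds the low bit while shifting right (objective: idiomatic).

-- ===== PORT A =====
-- while (x != 0): x = x & (x - 1); parity += 1
-- The `x < 0` guard only makes the Lean function total: Python diverges there
-- (excluded by Pre_checkEvenParity), so nothing is claimed about that branch.
def kernLoopA (x parity : Int) : Int :=
  if x = 0 then parity
  else if x < 0 then parity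
  else kernLoopA (PySem.Int.band x (x - 1)) (parity + 1)
termination_by x.toNat
decreasing_by
  rename_i h0 hneg
  have hx : 0 < x := by omega
  have hn : x = ((x.toNat : Nat) : Int) := by omega
  have h1 : x - 1 = ((x.toNat - 1 : Nat) : Int) := by omega
  rw [h1, hn, PySem.Int.band_natCast]
  have h2 : x.toNat &&& (x.toNat - 1) ≤ x.toNat - 1 := Nat.and_le_right
  simp only [Int.toNat_natCast]
  omega

def checkEvenParity (x : Int) : Bool :=
  if PySem.Int.mod (kernLoopA x 0) 2 = 0 then true else false

-- ===== PORT B =====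
-- while x: parity ^= (x & 1); x >>= 1
-- Same totality guard for x < 0 (Python diverges there; excluded by Pre_checkEvenParity).
def bitLoopB (x parity : Int) : Int :=
  if x = 0 then parity
  else if x < 0 then parity
  else bitLoopB (x >>> 1) (PySem.Int.bxor parity (PySem.Int.band x 1))
termination_by x.toNat
decreasing_by
  rename_i h0 hneg
  have hx : 0 < x := by omega
  have hn : x = ((x.toNat : Nat) : Int) := by omega
  rw [hn]
  rw [show ((x.toNat : Nat) : Int) >>> 1 = ((x.toNat >>> 1 : Nat) : Int) from (Int.mem_toNat?.mp rfl).symm]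
  simp only [Int.toNat_natCast, Nat.shiftRight_succ, Nat.shiftRight_zero]
  omega

def checkEvenParity_alt (x : Int) : Bool :=
  bitLoopB x 0 == 0

-- ===== PRECONDITION & SPEC =====
-- Pre_ excludes negative x, on which Python A (and Python B) loop forever and return nothing.
def Pre_checkEvenParity (x : Int) : Prop := 0 ≤ x
instance (x : Int) : Decidable (Pre_checkEvenParity x) := by unfold Pre_checkEvenParity; infer_instance
def pvWitness_checkEvenParity : Int := (12)

def Spec_checkEvenParity (x : Int) (out : Bool) : Prop := out = checkEvenParity_alt x
instance (x : Int) (out : Bool) : Decidable (Spec_checkEvenParity x out) := by unfold Spec_checkEvenParity; infer_instance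

-- ===== CLAIM (what is proved, stated in full; the proofs are below) =====
def Claim_equal_checkEvenParity : Prop := ∀ (x : Int), Dom_checkEvenParity x → Pre_checkEvenParity x → Spec_checkEvenParity x (checkEvenParity x)

-- ===== LEMMAS AND PROOFS =====

-- bit-sum (popcount) of a natural number, by halving
def popSum (n : Nat) : Nat :=
  if n = 0 then 0 else popSum (n / 2) + n % 2
termination_by n
decreasing_by omega

theorem popSum_zero : popSum 0 = 0 := by simp [popSum]

theorem popSum_pos (n : Nat) (h : n ≠ 0) : popSum n = popSum (n / 2) + n % 2 := by
  rw [popSum]; simp [h]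

theorem popSum_double (m : Nat) : popSum (2 * m) = popSum m := by
  rcases Nat.eq_zero_or_pos m with h | h
  · simp [h]
  · rw [popSum_pos _ (by omega)]
    have : 2 * m / 2 = m := by omega
    simp [this]

theorem odd_land (m : Nat) : (2*m+1) &&& (2*m) = 2*m := by
  apply Nat.eq_of_testBit_eq
  intro i
  rw [Nat.testBit_and]
  cases i with
  | zero => simp [Nat.testBit_zero]
  | succ j =>
    simp only [Nat.testBit_succ]
    have h1 : (2*m+1)/2 = m := by omega
    have h2 : (2*m)/2 = m := by omega
    rw [h1, h2]; cases m.testBit j <;> simp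

theorem even_land (m : Nat) (hm : 0 < m) : (2*m) &&& (2*m-1) = 2*(m &&& (m-1)) := by
  apply Nat.eq_of_testBit_eq
  intro i
  rw [Nat.testBit_and]
  have he : 2*m-1 = 2*(m-1)+1 := by omega
  rw [he]
  cases i with
  | zero => simp [Nat.testBit_zero]
  | succ j =>
    simp only [Nat.testBit_succ]
    have h1 : (2*m)/2 = m := by omega
    have h2 : (2*(m-1)+1)/2 = m-1 := by omega
    have h3 : (2*(m &&& (m-1)))/2 = m &&& (m-1) := by omega
    rw [h1, h2, h3, Nat.testBit_and]

-- clearing the lowest set bit removes exactly one from the bit sum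
theorem popSum_land_pred : ∀ n : Nat, 0 < n → popSum (n &&& (n - 1)) + 1 = popSum n := by
  intro n
  induction n using Nat.strong_induction_on with
  | _ n ih =>
    intro hn
    rcases Nat.even_or_odd n with ⟨m, hm⟩ | ⟨m, hm⟩
    · -- n = 2*m, m > 0
      have hm2 : n = 2 * m := by omega
      have hmpos : 0 < m := by omega
      rw [hm2, even_land m hmpos, popSum_double, popSum_double]
      exact ih m (by omega) hmpos
    · -- n = 2*m + 1
      have hm2 : n = 2 * m + 1 := by omega
      have hsub : 2 * m + 1 - 1 = 2 * m := by omega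
      rw [hm2, hsub, odd_land, popSum_double, popSum_pos (2*m+1) (by omega)]
      have : (2*m+1)/2 = m := by omega
      simp [this]

theorem kernLoopA_natCast : ∀ n : Nat, ∀ c : Int, kernLoopA ((n : Nat) : Int) c = c + ((popSum n : Nat) : Int) := by
  intro n
  induction n using Nat.strong_induction_on with
  | _ n ih =>
    intro c
    rcases Nat.eq_zero_or_pos n with h0 | hpos
    · subst h0; rw [kernLoopA.eq_def]; simp [popSum_zero]
    · rw [kernLoopA.eq_def]
      have hne : ((n : Nat) : Int) ≠ 0 := by omega
      have hnn : ¬ ((n : Nat) : Int) < 0 := by omega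
      simp only [hne, hnn, if_false]
      have h1 : ((n : Nat) : Int) - 1 = ((n - 1 : Nat) : Int) := by omega
      rw [h1, PySem.Int.band_natCast]
      have hlt : n &&& (n - 1) < n := by
        have := Nat.and_le_right (n := n) (m := n - 1)
        omega
      rw [ih _ hlt (c + 1)]
      have := popSum_land_pred n hpos
      omega

theorem bitLoopB_natCast : ∀ n : Nat, ∀ c : Nat, c < 2 →
    bitLoopB ((n : Nat) : Int) ((c : Nat) : Int) = (((c + popSum n) % 2 : Nat) : Int) := by
  intro n
  induction n using Nat.strong_induction_on with
  | _ n ih =>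
    intro c hc
    rcases Nat.eq_zero_or_pos n with h0 | hpos
    · subst h0; rw [bitLoopB.eq_def]; simp [popSum_zero]; omega
    · rw [bitLoopB.eq_def]
      have hne : ((n : Nat) : Int) ≠ 0 := by omega
      have hnn : ¬ ((n : Nat) : Int) < 0 := by omega
      simp only [hne, hnn, if_false]
      rw [show ((n : Nat) : Int) >>> 1 = ((n >>> 1 : Nat) : Int) from (Int.mem_toNat?.mp rfl).symm]
      rw [show (1 : Int) = ((1 : Nat) : Int) from rfl, PySem.Int.band_natCast, PySem.Int.bxor_natCast]
      have hdiv : n >>> 1 = n / 2 := by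
        simp [Nat.shiftRight_succ, Nat.shiftRight_zero]
      have hand1 : n &&& 1 = n % 2 := Nat.and_one_is_mod n
      rw [hdiv, hand1]
      have hxor : c ^^^ n % 2 = (c + n % 2) % 2 := by
        have h2 : n % 2 = 0 ∨ n % 2 = 1 := by omega
        rcases h2 with h | h <;> rw [h] <;> interval_cases c <;> decide
      rw [hxor]
      rw [ih (n / 2) (by omega) ((c + n % 2) % 2) (by omega)]
      congr 1
      rw [popSum_pos n (by omega)]
      omega

-- ===== VERDICT (by name: the statement is the Claim_ definition above) =====
theorem checkEvenParity_spec : Claim_equal_checkEvenParity := by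
  intro x _ hpre
  unfold Spec_checkEvenParity checkEvenParity checkEvenParity_alt
  have hx : x = ((x.toNat : Nat) : Int) := by
    unfold Pre_checkEvenParity at hpre; omega
  rw [hx, kernLoopA_natCast, show (0 : Int) = ((0 : Nat) : Int) from rfl,
    bitLoopB_natCast x.toNat 0 (by omega)]
  simp only [Nat.cast_zero, zero_add]
  have hmod : PySem.Int.mod (((popSum x.toNat : Nat) : Int)) 2
      = ((popSum x.toNat % 2 : Nat) : Int) := by
    simp [PySem.Int.mod, Int.fmod_eq_emod]
  rw [hmod]
  rcases Nat.eq_zero_or_pos (popSum x.toNat % 2) with h | h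
  · simp [h]
  · have h1 : popSum x.toNat % 2 = 1 := by omega
    simp [h1]
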